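-- pv_equiv track=rewrite | github.com/haui-fit/addtone_crfsuite | tokens.py | split_sent_postag
-- ===== SOURCE A (Python) =====
-- def split_sent_postag(sent):
--     sent = ' ' + sent + ' '
--     char = ' !@#$%^&*(\'|-=[];);/.{},+{}:"<>?'
--     start = 0
--     rs = []
--     for i, s in enumerate(sent):
--         if s in char:
--             s2 = sent[start + 1:i].strip()
--             if s2:
--                 rs.append(s2)
--             if s:
--                 rs.append(s)
--             start = i
--     return [s for s in rs[1:-1] if s.strip()]
-- ===== SOURCE B (Python) =====
-- _DELIMS = frozenset(' !@#$%^&*(\'|-=[];);/.{},+{}:"<>?')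
--
-- def split_sent_postag(sent):
--     out = []
--     buf = []
--     for c in sent:
--         if c in _DELIMS:
--             tok = ''.join(buf).strip()
--             if tok:
--                 out.append(tok)
--             buf = []
--             if c != ' ':
--                 out.append(c)
--         else:
--             buf.append(c)
--     tok = ''.join(buf).strip()
--     if tok:
--         out.append(tok)
--     return out
-- ===== Notes on version B (the rewrite author's own statement) =====
-- stated objective: simpler
-- what changed: Replaced A's pad-the-string / index-slicing scheme (prepend+append spaces, track delimiter indices, slice sent[start+1:i], then trim rs[1:-1] and post-filter) with a single accumulator pass keeping a current-token buffer, with no padding, no slicing and no final filter.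
import Mathlib
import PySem

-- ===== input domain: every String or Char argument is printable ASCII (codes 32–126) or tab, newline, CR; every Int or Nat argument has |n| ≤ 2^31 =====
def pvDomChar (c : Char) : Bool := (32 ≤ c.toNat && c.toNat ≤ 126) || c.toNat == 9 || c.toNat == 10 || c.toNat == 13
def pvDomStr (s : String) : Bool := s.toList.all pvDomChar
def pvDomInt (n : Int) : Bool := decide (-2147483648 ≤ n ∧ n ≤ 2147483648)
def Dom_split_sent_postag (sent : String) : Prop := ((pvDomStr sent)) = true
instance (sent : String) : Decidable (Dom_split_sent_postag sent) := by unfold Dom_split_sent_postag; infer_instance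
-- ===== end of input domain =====

-- B replaces A's pad-the-string / index-slice / trim-the-ends scheme by a single
-- accumulator pass (current-token buffer), no padding, no slicing, no post-filter;
-- objective: simpler.  Return-value equivalence only (neither version mutates its input).

-- ===== PORT A =====
-- the delimiter constant of A, duplicates kept as written
def pvADelims : List Char := " !@#$%^&*('|-=[];);/.{},+{}:\"<>?".toList

-- the enumerate loop of A: `full` is the padded sentence, `rem` the characters not
-- yet visited (= full.drop i), `i` the running index, `start`/`rs` A's loop state
def pvAGo (full : List Char) (rem : List Char) (i : Nat) (start : Nat)
    (rs : List String) : List String :=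
  match rem with
  | [] => rs
  | c :: rest =>
    if c ∈ pvADelims then
      -- s2 = sent[start + 1:i].strip()
      let s2 := PySem.Chars.strip (PySem.List.slice full (some ((start : Int) + 1)) (some (i : Int)))
      let rs1 := if s2 ≠ [] then rs ++ [String.ofList s2] else rs
      -- `if s:` — s is a 1-character string, truthy iff nonempty
      let rs2 := if ([c] : List Char) ≠ [] then rs1 ++ [String.ofList [c]] else rs1
      pvAGo full rest (i + 1) i rs2
    else
      pvAGo full rest (i + 1) start rs

def split_sent_postag (sent : String) : List String :=
  -- sent = ' ' + sent + ' '
  let padded : List Char := ' ' :: sent.toList ++ [' ']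
  let rs := pvAGo padded padded 0 0 []
  -- [s for s in rs[1:-1] if s.strip()]
  (PySem.List.slice rs (some 1) (some (-1))).filter (fun s => PySem.Str.strip s ≠ "")

-- ===== PORT B =====
-- the frozenset of delimiter characters of B
def pvBDelims : PySem.Set Char := PySem.Set.ofList " !@#$%^&*('|-=[];);/.{},+{}:\"<>?".toList

-- B's loop: `buf` is the current-token character buffer, `out` the result so far;
-- ''.join(buf) is String.ofList of the buffered characters
def pvBGo (rem : List Char) (buf : List Char) (out : List String) : List String :=
  match rem with
  | [] =>
    let tok := PySem.Chars.strip buf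
    if tok ≠ [] then out ++ [String.ofList tok] else out
  | c :: rest =>
    if pvBDelims.contains c then
      let tok := PySem.Chars.strip buf
      let out1 := if tok ≠ [] then out ++ [String.ofList tok] else out
      let out2 := if c ≠ ' ' then out1 ++ [String.ofList [c]] else out1
      pvBGo rest [] out2
    else
      pvBGo rest (buf ++ [c]) out

def split_sent_postag_alt (sent : String) : List String :=
  pvBGo sent.toList [] []

-- ===== PRECONDITION & SPEC =====
def Spec_split_sent_postag (sent : String) (out : List String) : Prop := out = split_sent_postag_alt sent
instance (sent : String) (out : List String) : Decidable (Spec_split_sent_postag sent out) := by unfold Spec_split_sent_postag; infer_instance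

-- ===== CLAIM (what is proved, stated in full; the proofs are below) =====
def Claim_equal_split_sent_postag : Prop := ∀ (sent : String), Dom_split_sent_postag sent → Spec_split_sent_postag sent (split_sent_postag sent)

-- ===== LEMMAS AND PROOFS =====

-- the filter A applies at the very end
def pvFilt (rs : List String) : List String := rs.filter (fun s => PySem.Str.strip s ≠ "")

-- B's loop without the final buffer flush (proof-side device only)
def pvBGoNF (rem : List Char) (buf : List Char) : List String :=
  match rem with
  | [] => []
  | c :: rest =>
    if pvBDelims.contains c then
      let tok := PySem.Chars.strip buf
      let out1 := if tok ≠ [] then [String.ofList tok] else []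
      let out2 := if c ≠ ' ' then out1 ++ [String.ofList [c]] else out1
      out2 ++ pvBGoNF rest []
    else
      pvBGoNF rest (buf ++ [c])

theorem pvAGo_acc (full rem : List Char) (i start : Nat) (rs : List String) :
    pvAGo full rem i start rs = rs ++ pvAGo full rem i start [] := by
  induction rem generalizing i start rs with
  | nil => simp [pvAGo]
  | cons c rest ih =>
    by_cases h : c ∈ pvADelims <;>
      simp only [pvAGo, h, if_pos, if_neg, not_false_eq_true]
    · split_ifs <;> (rw [ih]; try rw [ih _ _ (_ ++ _)]) <;> simp
    · exact ih (i+1) start rs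

theorem pvBGo_acc (rem buf : List Char) (out : List String) :
    pvBGo rem buf out = out ++ pvBGo rem buf [] := by
  induction rem generalizing buf out with
  | nil => simp [pvBGo]; split_ifs <;> simp
  | cons c rest ih =>
    by_cases h : pvBDelims.contains c <;> simp only [pvBGo, h, ite_true]
    · split_ifs <;> (rw [ih]; try rw [ih [] (_ ++ _)]) <;> simp
    · exact ih (buf ++ [c]) out

-- the non-space delimiters of the constant are not whitespace
theorem pvDelim_not_space (c : Char) (h : c ∈ pvADelims) (hne : c ≠ ' ') :
    PySem.Chars.isspace c = false := by
  have : pvADelims.all (fun d => d = ' ' || !PySem.Chars.isspace d) = true := by decide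
  rw [List.all_eq_true] at this
  have := this c h
  simp [hne] at this
  exact this

-- membership in B's frozenset = membership in A's constant
theorem pvDelims_same (c : Char) : pvBDelims.contains c = decide (c ∈ pvADelims) := by
  have hgen : ∀ (xs : List Char) (d : Char),
      (PySem.Set.ofList xs).contains d = decide (d ∈ xs) := by
    intro xs d; simp [pysem]
  unfold pvBDelims pvADelims
  exact hgen _ c

-- all characters of cs whitespace iff strip is empty
-- a non-whitespace character of cs survives dropWhile isspace
theorem pvMem_dropWhile (x : Char) (l : List Char) (hx : x ∈ l)
    (hp : PySem.Chars.isspace x = false) : x ∈ l.dropWhile PySem.Chars.isspace := by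
  induction l with
  | nil => simp at hx
  | cons a t ih =>
    by_cases ha : PySem.Chars.isspace a = true
    · rw [List.dropWhile_cons_of_pos ha]
      rcases List.mem_cons.mp hx with h1 | h1
      · subst h1; rw [hp] at ha; exact absurd ha (by simp)
      · exact ih h1
    · rw [List.dropWhile_cons_of_neg ha]; exact hx

-- a non-whitespace character of cs survives strip
theorem pvMem_strip (x : Char) (cs : List Char) (hx : x ∈ cs)
    (hp : PySem.Chars.isspace x = false) : x ∈ PySem.Chars.strip cs := by
  unfold PySem.Chars.strip PySem.Chars.lstrip PySem.Chars.rstrip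
  rw [List.mem_reverse]
  exact pvMem_dropWhile x _ (by rw [List.mem_reverse]; exact pvMem_dropWhile x cs hx hp) hp

theorem pvStrip_eq_nil_iff (cs : List Char) :
    PySem.Chars.strip cs = [] ↔ ∀ c ∈ cs, PySem.Chars.isspace c = true := by
  constructor
  · intro h c hc
    by_contra hns
    have := pvMem_strip c cs hc (by simpa using hns)
    rw [h] at this
    simp at this
  · intro h
    have h1 : PySem.Chars.lstrip cs = [] := by
      unfold PySem.Chars.lstrip
      rw [List.dropWhile_eq_nil_iff]
      intro x hx; exact h x hx
    unfold PySem.Chars.strip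
    rw [h1]
    rfl

-- a stripped nonempty token survives a second strip
theorem pvStrip_strip_ne_nil (cs : List Char) (h : PySem.Chars.strip cs ≠ []) :
    PySem.Chars.strip (PySem.Chars.strip cs) ≠ [] := by
  intro habs
  apply h
  rw [pvStrip_eq_nil_iff] at habs ⊢
  intro c hc
  by_cases hs : PySem.Chars.isspace c = true
  · exact hs
  · exact habs c (pvMem_strip c cs hc (by simpa using hs))

theorem pvFilt_append (rs ts : List String) : pvFilt (rs ++ ts) = pvFilt rs ++ pvFilt ts := by
  simp [pvFilt]

theorem pvStr_strip_ne_iff (ts : List Char) :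
    (PySem.Str.strip (String.ofList ts) ≠ "") ↔ PySem.Chars.strip ts ≠ [] := by
  simp [← String.toList_inj, PySem.Str.toList_strip]

theorem pvFilt_mk_strip (cs : List Char) (h : PySem.Chars.strip cs ≠ []) :
    pvFilt [String.ofList (PySem.Chars.strip cs)] = [String.ofList (PySem.Chars.strip cs)] := by
  have h2 := pvStrip_strip_ne_nil cs h
  simp [pvFilt, (pvStr_strip_ne_iff _).mpr h2]

theorem pvFilt_delim (c : Char) (h : c ∈ pvADelims) :
    pvFilt [String.ofList [c]] = if c ≠ ' ' then [String.ofList [c]] else [] := by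
  by_cases hc : c = ' '
  · subst hc; simp [pvFilt]; decide
  · have hns := pvDelim_not_space c h hc
    have : PySem.Chars.strip [c] = [c] := by
      unfold PySem.Chars.strip PySem.Chars.lstrip PySem.Chars.rstrip
      simp [hns]
    rw [if_pos hc]
    simp [pvFilt, (pvStr_strip_ne_iff [c]).mpr (by rw [this]; simp)]

-- the slice A takes grows by the visited character
theorem pvSlice_step (l : List Char) (s i : Nat) (c : Char) (rest : List Char)
    (h : l.drop i = c :: rest) (hs : s + 1 ≤ i) :
    (l.drop (s+1)).take (i + 1 - (s+1)) = ((l.drop (s+1)).take (i - (s+1))) ++ [c] := by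
  have h1 : i + 1 - (s+1) = (i - (s+1)) + 1 := by omega
  have h2 : (l.drop (s+1))[i - (s+1)]? = some c := by
    rw [List.getElem?_drop]
    have h3 : s + 1 + (i - (s+1)) = i := by omega
    rw [h3]
    have := congrArg (·[0]?) h
    simpa [List.getElem?_drop] using this
  rw [h1, List.take_add_one, h2]
  rfl

theorem pvDrop_step (l : List Char) (i : Nat) (c : Char) (rest : List Char)
    (h : l.drop i = c :: rest) : l.drop (i+1) = rest := by
  have h2 : l.drop (i+1) = (l.drop i).drop 1 := by rw [List.drop_drop]
  rw [h2, h]; rfl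

theorem pvSlice_nat (l : List Char) (s i : Nat) :
    PySem.List.slice l (some ((s : Int) + 1)) (some (i : Int)) = (l.drop (s+1)).take (i - (s+1)) := by
  have := PySem.List.slice_natCast (xs := l) (a := s + 1) (b := i)
  push_cast at this ⊢
  rw [this]

-- MAIN: A's filtered loop output equals B's no-flush loop
theorem pvMain (rem : List Char) (full : List Char) (i start : Nat) (buf : List Char)
    (hrem : full.drop i = rem)
    (hbuf : (full.drop (start+1)).take (i - (start+1)) = buf)
    (hs : start + 1 ≤ i) :
    pvFilt (pvAGo full rem i start []) = pvBGoNF rem buf := by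
  induction rem generalizing i start buf with
  | nil => simp [pvAGo, pvBGoNF, pvFilt]
  | cons c rest ih =>
    by_cases h : c ∈ pvADelims
    · have hb : pvBDelims.contains c = true := by rw [pvDelims_same]; simpa
      have hs2 : PySem.Chars.strip (PySem.List.slice full (some ((start : Int) + 1)) (some (i : Int)))
          = PySem.Chars.strip buf := by rw [pvSlice_nat, hbuf]
      have ihx := ih (i + 1) i [] (pvDrop_step full i c rest hrem) (by simp) (by omega)
      simp only [pvAGo, h, ite_true, hs2]
      simp only [pvBGoNF, hb, ite_true]
      rw [if_pos (by simp : ([c] : List Char) ≠ [])]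
      by_cases h1 : PySem.Chars.strip buf ≠ []
      · rw [if_pos h1, if_pos h1, pvAGo_acc, pvFilt_append, pvFilt_append, ihx]
        simp only [List.nil_append]
        rw [pvFilt_mk_strip buf h1, pvFilt_delim c h]
        split_ifs <;> simp
      · rw [if_neg h1]
        try rw [if_neg h1]
        simp only [List.nil_append]
        rw [pvAGo_acc, pvFilt_append, ihx, pvFilt_delim c h]
    · have hb : pvBDelims.contains c = false := by rw [pvDelims_same]; simpa
      simp only [pvAGo, h, ite_false]
      simp only [pvBGoNF, hb, Bool.false_eq_true, ite_false]
      exact ih (i + 1) start (buf ++ [c]) (pvDrop_step full i c rest hrem)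
        (by rw [← hbuf]; exact pvSlice_step full start i c rest hrem hs) (by omega)

-- B's no-flush loop on cs ++ [' '] equals B's real loop on cs
theorem pvBGoNF_pad (cs : List Char) (buf : List Char) :
    pvBGoNF (cs ++ [' ']) buf = pvBGo cs buf [] := by
  induction cs generalizing buf with
  | nil =>
    have hsp : ' ' ∈ pvBDelims := by decide
    have hsp2 : pvBDelims.contains ' ' = true := by decide
    simp [pvBGoNF, pvBGo, hsp]
  | cons c rest ih =>
    by_cases h : pvBDelims.contains c <;>
      simp only [List.cons_append, pvBGoNF, pvBGo, h, ite_true]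
    · rw [ih]
      split_ifs <;> (conv_rhs => rw [pvBGo_acc]) <;> simp
    · exact ih (buf ++ [c])

-- A's loop output on a ' '-terminated remainder always ends with the string " "
theorem pvAGo_last (cs : List Char) (full : List Char) (i start : Nat) :
    ∃ t, pvAGo full (cs ++ [' ']) i start [] = t ++ [" "] := by
  induction cs generalizing i start with
  | nil =>
    simp only [List.nil_append, pvAGo, if_pos (by decide : ' ' ∈ pvADelims)]
    rw [if_pos (by simp : ([' '] : List Char) ≠ [])]
    split_ifs with h2
    · exact ⟨_, rfl⟩
    · exact ⟨[], by simp⟩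
  | cons c rest ih =>
    by_cases h : c ∈ pvADelims <;>
      simp only [List.cons_append, pvAGo, h, ite_true, ite_false]
    · obtain ⟨t, ht⟩ := ih (i+1) i
      rw [pvAGo_acc, ht]
      exact ⟨(if PySem.Chars.strip (PySem.List.slice full (some ((start : Int) + 1)) (some (i : Int))) = []
          then ([] : List String)
          else [String.ofList (PySem.Chars.strip (PySem.List.slice full (some ((start : Int) + 1)) (some (i : Int))))])
        ++ String.ofList [c] :: t, by split_ifs <;> simp_all⟩
    · exact ih (i+1) start

theorem pvSlice_mid (x z : String) (ys : List String) :
    PySem.List.slice (x :: (ys ++ [z])) (some 1) (some (-1)) = ys := by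
  simp [PySem.List.slice, PySem.List.clampIdx]
  rw [if_neg (by omega)]
  simp [List.take_left']

theorem pvFilt_space : pvFilt [" "] = [] := by decide

-- ===== VERDICT (by name: the statement is the Claim_ definition above) =====
theorem split_sent_postag_spec : Claim_equal_split_sent_postag := by
  intro sent _
  unfold Spec_split_sent_postag split_sent_postag split_sent_postag_alt
  have h0 : pvAGo (' ' :: sent.toList ++ [' ']) (' ' :: sent.toList ++ [' ']) 0 0 []
      = " " :: pvAGo (' ' :: sent.toList ++ [' ']) (sent.toList ++ [' ']) 1 0 [] := by
    simp [pvAGo, (by decide : ' ' ∈ pvADelims), PySem.List.slice, PySem.List.clampIdx,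
      PySem.Chars.strip, PySem.Chars.lstrip, PySem.Chars.rstrip]
    rw [pvAGo_acc]
    rfl
  obtain ⟨t, ht⟩ := pvAGo_last sent.toList (' ' :: sent.toList ++ [' ']) 1 0
  have hmain : pvFilt (pvAGo (' ' :: sent.toList ++ [' ']) (sent.toList ++ [' ']) 1 0 [])
      = pvBGoNF (sent.toList ++ [' ']) [] := by
    apply pvMain
    · rfl
    · simp
    · omega
  show (PySem.List.slice (pvAGo (' ' :: sent.toList ++ [' ']) (' ' :: sent.toList ++ [' ']) 0 0 [])
      (some 1) (some (-1))).filter (fun s => PySem.Str.strip s ≠ "") = pvBGo sent.toList [] []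
  rw [h0, ht, pvSlice_mid]
  have hfe : pvFilt t = pvFilt (t ++ [" "]) := by rw [pvFilt_append, pvFilt_space]; simp
  calc t.filter (fun s => PySem.Str.strip s ≠ "") = pvFilt t := rfl
    _ = pvFilt (t ++ [" "]) := hfe
    _ = pvBGoNF (sent.toList ++ [' ']) [] := by rw [← ht, hmain]
    _ = pvBGo sent.toList [] [] := pvBGoNF_pad sent.toList []
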